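-- pv_equiv track=rewrite | github.com/BriceMetthey/Terminale-NSI | Séquence_6_Diviser_pour_régner/compter_occurences.py | compter_occurrences
-- ===== SOURCE A (Python) =====
-- def compter_occurrences(tab: list, debut: int, fin: int, x: int):
--     """
--     Permet de compter le nombre de fois qu'un élément x apparaît dans le tableau tab.
--     """
--
--     # Cas de base : un seul élément
--     if debut == fin:
--         if tab[debut] == x:
--             return 1
--         else:
--             return 0
--
--     # Diviser le tab en deux moitiés
--     milieu = (debut + fin) // 2
--     gauche = compter_occurrences(tab, debut, milieu, x)
--     droite = compter_occurrences(tab, milieu + 1, fin, x)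
--
--     # Combiner les résultats
--     return gauche + droite
-- ===== SOURCE B (Python) =====
-- def compter_occurrences(tab: list, debut: int, fin: int, x: int):
--     """Single pass over tab[debut..fin] with a running counter and an explicit stop at fin."""
--     compteur = 0
--     i = debut
--     while True:
--         if tab[i] == x:
--             compteur += 1
--         if i == fin:
--             return compteur
--         i += 1
-- ===== Notes on version B (the rewrite author's own statement) =====
-- stated objective: simpler
-- what changed: Replaced the recursive divide-and-conquer with a single iterative pass that keeps a running counter over range(debut, fin+1).
import Mathlib
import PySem

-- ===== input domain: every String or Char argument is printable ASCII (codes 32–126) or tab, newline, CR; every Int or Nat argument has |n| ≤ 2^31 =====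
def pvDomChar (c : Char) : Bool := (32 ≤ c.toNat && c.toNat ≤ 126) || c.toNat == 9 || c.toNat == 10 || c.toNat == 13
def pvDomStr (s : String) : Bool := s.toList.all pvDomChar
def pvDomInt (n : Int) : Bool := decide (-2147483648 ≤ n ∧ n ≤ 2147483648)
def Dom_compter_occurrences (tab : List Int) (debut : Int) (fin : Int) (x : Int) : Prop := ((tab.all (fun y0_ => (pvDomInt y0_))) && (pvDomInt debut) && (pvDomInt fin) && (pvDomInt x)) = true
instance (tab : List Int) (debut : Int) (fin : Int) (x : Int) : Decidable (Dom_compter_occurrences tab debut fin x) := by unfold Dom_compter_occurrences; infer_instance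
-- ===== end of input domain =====

-- B replaces A's divide-and-conquer recursion with a single linear pass keeping a running
-- counter (explicit stop at index fin); return-value equivalence on ranges debut ≤ fin with valid indices.

-- ===== PORT A =====
-- Literal port of A's divide-and-conquer. The 'fin < debut' branch is a totality guard only:
-- there Python recurses forever (RecursionError); those inputs are outside Pre_.
def compter_occurrences (tab : List Int) (debut : Int) (fin : Int) (x : Int) : Int :=
  if debut = fin then
    if PySem.List.pyGet? tab debut = some x then 1 else 0
  else if fin < debut then 0
  else
    let milieu := PySem.Int.floordiv (debut + fin) 2
    let gauche := compter_occurrences tab debut milieu x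
    let droite := compter_occurrences tab (milieu + 1) fin x
    gauche + droite
termination_by (fin - debut).toNat
decreasing_by
  · have h := PySem.Int.floordiv_lt_iff_lt_mul (a := debut + fin) (b := 2) (q := fin) (by omega)
    have h2 := PySem.Int.le_floordiv_iff_mul_le (a := debut + fin) (b := 2) (q := debut) (by omega)
    omega
  · have h := PySem.Int.floordiv_lt_iff_lt_mul (a := debut + fin) (b := 2) (q := fin) (by omega)
    have h2 := PySem.Int.le_floordiv_iff_mul_le (a := debut + fin) (b := 2) (q := debut) (by omega)
    omega

-- ===== PORT B =====
-- Port of Source B's 'while True' loop: index i, running counter; stop when i = fin.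
-- 'pyGet? = none' is Python's IndexError (the loop raises there; outside Pre_): the port stops with the counter.
theorem compterLoop_index_lt {tab : List Int} {i v : Int}
    (h : PySem.List.pyGet? tab i = some v) : i < (tab.length : Int) := by
  by_contra hge
  have : PySem.List.pyGet? tab i = none := by
    rw [PySem.List.pyGet?_eq_none_iff]
    intro hin
    simp [PySem.Raise.InRange] at hin
    omega
  simp [this] at h

def compterLoop (tab : List Int) (fin : Int) (x : Int) (i : Int) (compteur : Int) : Int :=
  match h : PySem.List.pyGet? tab i with
  | none => compteur
  | some v =>
    let c := if v = x then compteur + 1 else compteur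
    if i = fin then c else compterLoop tab fin x (i + 1) c
termination_by ((tab.length : Int) - i).toNat
decreasing_by
  have := compterLoop_index_lt h
  omega

def compter_occurrences_alt (tab : List Int) (debut : Int) (fin : Int) (x : Int) : Int :=
  compterLoop tab fin x debut 0

-- ===== PRECONDITION & SPEC =====
-- Pre_ excludes debut > fin (A recurses forever: RecursionError) and indices outside
-- Python's valid range -len(tab) ≤ i < len(tab) (A raises IndexError); A returns on all other inputs.
def Pre_compter_occurrences (tab : List Int) (debut : Int) (fin : Int) (x : Int) : Prop :=
  -(tab.length : Int) ≤ debut ∧ debut ≤ fin ∧ fin < (tab.length : Int)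
instance (tab : List Int) (debut : Int) (fin : Int) (x : Int) : Decidable (Pre_compter_occurrences tab debut fin x) := by unfold Pre_compter_occurrences; infer_instance

def pvWitness_compter_occurrences : List Int × Int × Int × Int := ([1, 2, 1, 3], 0, 3, 1)

def Spec_compter_occurrences (tab : List Int) (debut : Int) (fin : Int) (x : Int) (out : Int) : Prop := out = compter_occurrences_alt tab debut fin x
instance (tab : List Int) (debut : Int) (fin : Int) (x : Int) (out : Int) : Decidable (Spec_compter_occurrences tab debut fin x out) := by unfold Spec_compter_occurrences; infer_instance

-- ===== CLAIM (what is proved, stated in full; the proofs are below) =====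
def Claim_equal_compter_occurrences : Prop := ∀ (tab : List Int) (debut : Int) (fin : Int) (x : Int), Dom_compter_occurrences tab debut fin x → Pre_compter_occurrences tab debut fin x → Spec_compter_occurrences tab debut fin x (compter_occurrences tab debut fin x)

-- ===== LEMMAS AND PROOFS =====

-- A computes the number of indices in [debut, fin] whose element equals x,
-- by strong induction on the width of the range.
theorem a_eq_countP (tab : List Int) (x : Int) :
    ∀ (n : Nat) (debut fin : Int), (fin - debut).toNat = n → debut ≤ fin →
      compter_occurrences tab debut fin x =
        ((PySem.List.pyRange debut (fin + 1) 1).countP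
          (fun i => decide (PySem.List.pyGet? tab i = some x)) : Int) := by
  intro n
  induction n using Nat.strong_induction_on with
  | _ n ih =>
    intro debut fin hn hle
    rw [compter_occurrences]
    by_cases heq : debut = fin
    · subst heq
      rw [PySem.List.pyRange_one_cons (by omega),
          PySem.List.pyRange_one_eq_nil (by omega)]
      simp [List.countP_cons]
    · have hlt : debut < fin := lt_of_le_of_ne hle heq
      have hmid := PySem.Int.floordiv_two_mid_bounds (lo := debut) (hi := fin) hle
      have hmlt : PySem.Int.floordiv (debut + fin) 2 < fin :=
        (PySem.Int.floordiv_lt_iff_lt_mul (a := debut + fin) (b := 2) (q := fin) (by omega)).mpr (by omega)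
      set m := PySem.Int.floordiv (debut + fin) 2 with hm
      simp only [if_neg heq, if_neg (by omega : ¬ fin < debut)]
      have hg := ih (m - debut).toNat (by omega) debut m rfl (by omega)
      have hd := ih (fin - (m + 1)).toNat (by omega) (m + 1) fin rfl (by omega)
      rw [hg, hd,
          PySem.List.pyRange_one_append (a := debut) (m := m + 1) (b := fin + 1) (by omega) (by omega),
          List.countP_append]
      push_cast
      ring

-- inside the valid index range, pyGet? succeeds
theorem pyGet?_isSome_of_inrange (tab : List Int) (i : Int)
    (h1 : -(tab.length : Int) ≤ i) (h2 : i < (tab.length : Int)) :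
    ∃ v, PySem.List.pyGet? tab i = some v := by
  cases hv : PySem.List.pyGet? tab i with
  | some v => exact ⟨v, rfl⟩
  | none =>
    rw [PySem.List.pyGet?_eq_none_iff] at hv
    exact absurd (by simp [PySem.Raise.InRange]; omega) hv

-- B's loop adds to the counter the number of indices in [i, fin] whose element equals x.
theorem compterLoop_eq_countP (tab : List Int) (x fin : Int) (hfin : fin < (tab.length : Int)) :
    ∀ (n : Nat) (i compteur : Int), (fin - i).toNat = n →
      -(tab.length : Int) ≤ i → i ≤ fin →
      compterLoop tab fin x i compteur =
        compteur + ((PySem.List.pyRange i (fin + 1) 1).countP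
          (fun j => decide (PySem.List.pyGet? tab j = some x)) : Int) := by
  intro n
  induction n using Nat.strong_induction_on with
  | _ n ih =>
    intro i compteur hn hlo hle
    obtain ⟨v, hv⟩ := pyGet?_isSome_of_inrange tab i hlo (by omega)
    rw [compterLoop, PySem.List.pyRange_one_cons (by omega : i < fin + 1), List.countP_cons]
    split
    next hnone => rw [hv] at hnone; cases hnone
    next v' hv' =>
      rw [hv] at hv'
      obtain rfl : v' = v := (Option.some.inj hv').symm
      by_cases heq : i = fin
      · subst heq
        rw [if_pos rfl, PySem.List.pyRange_one_eq_nil (by omega)]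
        simp only [List.countP_nil, Nat.zero_add]
        split_ifs <;> simp_all
      · rw [if_neg heq, ih (fin - (i + 1)).toNat (by omega) (i + 1) _ rfl (by omega) (by omega)]
        split_ifs <;> simp_all <;> ring

-- ===== VERDICT (by name: the statement is the Claim_ definition above) =====
theorem compter_occurrences_spec : Claim_equal_compter_occurrences := by
  intro tab debut fin x _ hpre
  obtain ⟨h1, h2, h3⟩ := hpre
  unfold Spec_compter_occurrences compter_occurrences_alt
  rw [a_eq_countP tab x (fin - debut).toNat debut fin rfl h2,
      compterLoop_eq_countP tab x fin h3 (fin - debut).toNat debut 0 rfl h1 h2]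
  ring
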